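-- pv_equiv track=rewrite | github.com/TheNitromeFan/baekjoon | 18018.py | play
-- ===== SOURCE A (Python) =====
-- def eliminates(animals, animal):
--     for animal1 in animals:
--         if animal1 == animal:
--             continue
--         if animal1[0] == animal[-1]:
--             return False
--     return True
--
-- def play(previous, animals):
--     for animal in animals:
--         if animal[0] == previous[-1] and eliminates(animals, animal):
--             return animal + "!"
--     for animal in animals:
--         if animal[0] == previous[-1]:
--             return animal
--     return "?"
-- ===== SOURCE B (Python) =====
-- def play(previous, animals):
--     # One pass with precomputed counters: eliminates() becomes an O(1) count
--     # test instead of an inner scan, and the two scans of A fuse into one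
--     # loop carrying the first chain-match as a fallback.
--     firsts = {}
--     copies = {}
--     for a in animals:
--         firsts[a[0]] = firsts.get(a[0], 0) + 1
--         copies[a] = copies.get(a, 0) + 1
--     fallback = None
--     for animal in animals:
--         if animal[0] == previous[-1]:
--             blockers = firsts.get(animal[-1], 0)
--             if animal[0] == animal[-1]:
--                 blockers -= copies[animal]
--             if blockers == 0:
--                 return animal + "!"
--             if fallback is None:
--                 fallback = animal
--     return fallback if fallback is not None else "?"
-- ===== Notes on version B (the rewrite author's own statement) =====
-- stated objective: faster
-- what changed: Replaces A's quadratic double scan (per-animal eliminates() rescan plus a second pass) with one pass over precomputed first-letter and copy counters, deciding eliminates by a count comparison and carrying the first chain-match as a fallback.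
import Mathlib
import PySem

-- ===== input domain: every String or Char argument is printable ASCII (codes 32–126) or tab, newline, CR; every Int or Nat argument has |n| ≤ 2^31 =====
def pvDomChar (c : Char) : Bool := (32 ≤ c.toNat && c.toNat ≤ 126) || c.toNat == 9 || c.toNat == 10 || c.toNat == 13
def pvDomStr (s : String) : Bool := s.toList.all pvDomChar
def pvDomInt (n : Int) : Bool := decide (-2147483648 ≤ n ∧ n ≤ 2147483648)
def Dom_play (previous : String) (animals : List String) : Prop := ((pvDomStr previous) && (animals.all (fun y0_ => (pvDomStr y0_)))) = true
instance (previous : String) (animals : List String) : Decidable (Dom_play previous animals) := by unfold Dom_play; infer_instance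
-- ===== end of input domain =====

-- B replaces A's quadratic double scan by one pass over precomputed counters (measured faster at scale); return values proven equal wherever A returns.

-- shared string-indexing helpers: s[0] and s[-1] (none = IndexError, excluded by Pre_)
def pvFirst (s : String) : Option Char := PySem.Str.pyGet? s 0
def pvLast (s : String) : Option Char := PySem.Str.pyGet? s (-1)

-- ===== PORT A =====
def eliminatesGo (animal : String) : List String → Bool
  | [] => true
  | a1 :: rest =>
    if a1 = animal then eliminatesGo animal rest
    else if pvFirst a1 = pvLast animal then false
    else eliminatesGo animal rest

def eliminates (animals : List String) (animal : String) : Bool :=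
  eliminatesGo animal animals

def playLoop1 (previous : String) (animals : List String) : List String → Option String
  | [] => none
  | animal :: rest =>
    if pvFirst animal = pvLast previous ∧ eliminates animals animal = true then some (animal ++ "!")
    else playLoop1 previous animals rest

def playLoop2 (previous : String) : List String → Option String
  | [] => none
  | animal :: rest =>
    if pvFirst animal = pvLast previous then some animal
    else playLoop2 previous rest

def play (previous : String) (animals : List String) : String :=
  match playLoop1 previous animals animals with
  | some r => r
  | none =>
    match playLoop2 previous animals with
    | some r => r
    | none => "?"

-- ===== PORT B =====
-- one building pass: firsts = counts of first letters, copies = counts of whole strings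
def buildCounts (animals : List String) :
    PySem.Dict (Option Char) Int × PySem.Dict String Int :=
  animals.foldl
    (fun p x => (p.1.modify (pvFirst x) 0 (· + 1), p.2.modify x 0 (· + 1)))
    (PySem.Dict.empty, PySem.Dict.empty)

-- blockers of Source B: the count of other animals whose first letter matches animal's last
def blockersOf (firsts : PySem.Dict (Option Char) Int) (copies : PySem.Dict String Int)
    (animal : String) : Int :=
  let blockers := firsts.getD (pvLast animal) 0
  if pvFirst animal = pvLast animal then blockers - copies.getD animal 0 else blockers

def altGo (previous : String) (firsts : PySem.Dict (Option Char) Int)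
    (copies : PySem.Dict String Int) (fallback : Option String) : List String → String
  | [] => match fallback with | some f => f | none => "?"
  | animal :: rest =>
    if pvFirst animal = pvLast previous then
      if blockersOf firsts copies animal = 0 then animal ++ "!"
      else altGo previous firsts copies
        (match fallback with | none => some animal | some f => some f) rest
    else altGo previous firsts copies fallback rest

def play_alt (previous : String) (animals : List String) : String :=
  let c := buildCounts animals
  altGo previous c.1 c.2 none animals

-- ===== PRECONDITION & SPEC =====
-- Pre_: exactly where the Python A returns without raising — with a nonempty animal
-- list, previous and every animal must be nonempty, else some s[0]/s[-1] raises IndexError.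
def Pre_play (previous : String) (animals : List String) : Prop :=
  animals = [] ∨ (previous ≠ "" ∧ ∀ a ∈ animals, a ≠ "")
instance (previous : String) (animals : List String) : Decidable (Pre_play previous animals) := by
  unfold Pre_play; infer_instance

def pvWitness_play : String × List String := ("ab", ["bc", "ca"])

def Spec_play (previous : String) (animals : List String) (out : String) : Prop := out = play_alt previous animals
instance (previous : String) (animals : List String) (out : String) : Decidable (Spec_play previous animals out) := by unfold Spec_play; infer_instance

-- ===== CLAIM (what is proved, stated in full; the proofs are below) =====
def Claim_equal_play : Prop := ∀ (previous : String) (animals : List String), Dom_play previous animals → Pre_play previous animals → Spec_play previous animals (play previous animals)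

-- ===== LEMMAS AND PROOFS =====

-- common model of both programs: first chain-match that eliminates, else fallback, else first chain-match
def modelFind (previous : String) (animals l : List String) (fallback : Option String) : String :=
  match l.find? (fun a => decide (pvFirst a = pvLast previous) && eliminatesGo a animals) with
  | some a => a ++ "!"
  | none =>
    match fallback with
    | some f => f
    | none =>
      match l.find? (fun a => decide (pvFirst a = pvLast previous)) with
      | some a => a
      | none => "?"

lemma eliminatesGo_iff (a : String) (l : List String) :
    eliminatesGo a l = true ↔ ∀ x ∈ l, ¬(x ≠ a ∧ pvFirst x = pvLast a) := by
  induction l with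
  | nil => simp [eliminatesGo]
  | cons x rest ih =>
    by_cases hx : x = a
    · simp [eliminatesGo, hx, ih]
    · by_cases hf : pvFirst x = pvLast a
      · simp [eliminatesGo, hx, hf]
      · simp [eliminatesGo, hx, hf, ih]

lemma blk_eq_countP (animals : List String) (a : String) :
    ((animals.map pvFirst).count (pvLast a) : Int)
      - (if pvFirst a = pvLast a then ((animals.count a : Nat) : Int) else 0)
    = ((animals.countP (fun x => decide (x ≠ a) && decide (pvFirst x = pvLast a)) : Nat) : Int) := by
  induction animals with
  | nil => simp
  | cons x rest ih =>
    by_cases hx : x = a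
    · subst hx
      by_cases hf : pvFirst x = pvLast x
      · simp only [List.map_cons, List.count_cons, List.countP_cons, hf] at ih ⊢
        simp only [ne_eq, not_true_eq_false, decide_false, Bool.false_and, if_true,
          BEq.rfl] at ih ⊢
        push_cast
        omega
      · simp [hf] at ih ⊢
        omega
    · by_cases hf : pvFirst x = pvLast a
      · simp [hx, hf] at ih ⊢
        split_ifs at ih ⊢ <;> omega
      · simp [hx, hf] at ih ⊢
        split_ifs at ih ⊢ <;> omega

lemma buildCounts_eq (animals : List String) :
    buildCounts animals
      = (PySem.Dict.counter (animals.map pvFirst), PySem.Dict.counter animals) := by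
  rw [PySem.Dict.counter_eq_foldl, PySem.Dict.counter_eq_foldl, List.foldl_map]
  unfold buildCounts
  exact PySem.List.foldl_prod_mk
    (fun (d : PySem.Dict (Option Char) Int) (x : String) => d.modify (pvFirst x) 0 (· + 1))
    (fun (d : PySem.Dict String Int) (x : String) => d.modify x 0 (· + 1))
    animals PySem.Dict.empty PySem.Dict.empty

-- the blockers test of B decides exactly A's eliminates
lemma blockers_iff (animals : List String) (a : String) :
    blockersOf (buildCounts animals).1 (buildCounts animals).2 a = 0
    ↔ eliminatesGo a animals = true := by
  unfold blockersOf
  rw [buildCounts_eq]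
  simp only [PySem.Dict.getD_counter]
  have h := blk_eq_countP animals a
  rw [eliminatesGo_iff]
  constructor
  · intro h0
    have hz : animals.countP (fun x => decide (x ≠ a) && decide (pvFirst x = pvLast a)) = 0 := by
      have hzi : ((animals.countP (fun x => decide (x ≠ a) && decide (pvFirst x = pvLast a)) : Nat) : Int) = 0 := by
        rw [← h]; split_ifs at h0 ⊢ <;> omega
      exact_mod_cast hzi
    rw [List.countP_eq_zero] at hz
    intro x hx hne
    have := hz x hx
    simp only [Bool.and_eq_true, decide_eq_true_eq, not_and] at this
    exact this hne.1 hne.2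
  · intro hall
    have hz : animals.countP (fun x => decide (x ≠ a) && decide (pvFirst x = pvLast a)) = 0 := by
      rw [List.countP_eq_zero]
      intro x hx
      have := hall x hx
      simp only [Bool.and_eq_true, decide_eq_true_eq, not_and] at this ⊢
      tauto
    rw [hz] at h
    split_ifs at h ⊢ <;> omega

lemma playLoop1_eq (previous : String) (animals l : List String) :
    playLoop1 previous animals l
      = (l.find? (fun a => decide (pvFirst a = pvLast previous) && eliminatesGo a animals)).map (· ++ "!") := by
  induction l with
  | nil => simp [playLoop1]
  | cons x rest ih =>
    by_cases h : pvFirst x = pvLast previous ∧ eliminates animals x = true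
    · rw [playLoop1, if_pos h, List.find?_cons]
      have ht : (decide (pvFirst x = pvLast previous) && eliminatesGo x animals) = true := by
        simp only [Bool.and_eq_true, decide_eq_true_eq]; exact ⟨h.1, h.2⟩
      rw [ht]
      rfl
    · rw [playLoop1, if_neg h, ih, List.find?_cons]
      have ht : (decide (pvFirst x = pvLast previous) && eliminatesGo x animals) = false := by
        by_cases h1 : pvFirst x = pvLast previous
        · simp only [h1, decide_true, Bool.true_and]
          exact Bool.eq_false_iff.mpr (fun he => h ⟨h1, he⟩)
        · simp [h1]
      rw [ht]

lemma playLoop2_eq (previous : String) (l : List String) :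
    playLoop2 previous l = l.find? (fun a => decide (pvFirst a = pvLast previous)) := by
  induction l with
  | nil => simp [playLoop2]
  | cons x rest ih =>
    by_cases h : pvFirst x = pvLast previous
    · simp [playLoop2, h]
    · simp [playLoop2, h, ih]

lemma play_eq_model (previous : String) (animals : List String) :
    play previous animals = modelFind previous animals animals none := by
  unfold play modelFind
  rw [playLoop1_eq, playLoop2_eq]
  cases animals.find? (fun a => decide (pvFirst a = pvLast previous) && eliminatesGo a animals) with
  | none => simp
  | some a => simp

lemma altGo_eq_model (previous : String) (animals : List String) :
    ∀ (l : List String) (fallback : Option String),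
      altGo previous (buildCounts animals).1 (buildCounts animals).2 fallback l
        = modelFind previous animals l fallback := by
  intro l
  induction l with
  | nil => intro fallback; cases fallback <;> simp [altGo, modelFind]
  | cons x rest ih =>
    intro fallback
    by_cases hc : pvFirst x = pvLast previous
    · by_cases he : eliminatesGo x animals = true
      · have hb := (blockers_iff animals x).mpr he
        rw [altGo.eq_def]
        simp only [if_pos hc, if_pos hb]
        unfold modelFind
        rw [List.find?_cons]
        have ht : (decide (pvFirst x = pvLast previous) && eliminatesGo x animals) = true := by
          simp only [Bool.and_eq_true, decide_eq_true_eq]; exact ⟨hc, he⟩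
        rw [ht]
      · have hb : ¬ blockersOf (buildCounts animals).1 (buildCounts animals).2 x = 0 :=
          fun h => he ((blockers_iff animals x).mp h)
        rw [altGo.eq_def]
        simp only [if_pos hc, if_neg hb]
        rw [ih]
        have hf : (decide (pvFirst x = pvLast previous) && eliminatesGo x animals) = false := by
          simp only [hc, decide_true, Bool.true_and]
          exact Bool.eq_false_iff.mpr he
        cases fallback with
        | some f =>
          unfold modelFind
          rw [List.find?_cons, hf]
        | none =>
          unfold modelFind
          rw [List.find?_cons, hf]
          cases hrest : rest.find? (fun a => decide (pvFirst a = pvLast previous) && eliminatesGo a animals) with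
          | some a => simp
          | none => simp [hc]
    · rw [altGo.eq_def]
      simp only [if_neg hc]
      rw [ih]
      unfold modelFind
      rw [List.find?_cons, List.find?_cons]
      have hf : (decide (pvFirst x = pvLast previous) && eliminatesGo x animals) = false := by
        simp [hc]
      have hf2 : (decide (pvFirst x = pvLast previous)) = false := by simp [hc]
      rw [hf, hf2]

-- ===== VERDICT (by name: the statement is the Claim_ definition above) =====
theorem play_spec : Claim_equal_play := by
  intro previous animals _ _
  unfold Spec_play play_alt
  rw [play_eq_model, altGo_eq_model]
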